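-- pv_equiv track=rewrite | github.com/zorbzers/slm-vuln-localisation | lova/attention_reduction.py | build_token_to_line_map
-- ===== SOURCE A (Python) =====
-- from typing import List, Dict, Tuple
--
-- def build_token_to_line_map(line_map: Dict[int, str], offset_mapping: List[Tuple[int, int]]) -> List[int]:
--     """
--     Build mapping from token index to line number.
--
--     Parameters
--     ----------
--     line_map : Dict[int, str]
--         Mapping from line number to line content.
--     offset_mapping : List[Tuple[int, int]]
--         List of (start_offset, end_offset) for each token.
--
--     Returns
--     -------
--     token_to_line : List[int]
--         List where index is token index and value is corresponding line number.
--     """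
--     code_lines = list(line_map.items())  # [(line_no, line_str)]
--     line_spans = []
--     total_offset = 0
--     for line_no, line in code_lines:
--         line_header = f"[{line_no}] "
--         line_len = len(line_header + line) + 1  # +1 for \n
--         span = (line_no, total_offset, total_offset + line_len)
--         line_spans.append(span)
--         total_offset += line_len
--
--     token_to_line = []
--     for start, end in offset_mapping:
--         matched_line = None
--         for line_no, span_start, span_end in line_spans:
--             if start >= span_start and start < span_end:
--                 matched_line = line_no
--                 break
--         token_to_line.append(matched_line)
--
--     return token_to_line
-- ===== SOURCE B (Python) =====
-- def build_token_to_line_map(line_map, offset_mapping):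
--     # Precompute cumulative span boundaries once, then binary-search each
--     # token's start offset instead of scanning all spans per token.
--     nos = []
--     bounds = [0]
--     total = 0
--     for line_no, line in line_map.items():
--         nos.append(line_no)
--         total += len(line) + len(str(line_no)) + 4
--         bounds.append(total)
--     token_to_line = []
--     for start, _end in offset_mapping:
--         if 0 <= start < total:
--             lo, hi = 0, len(nos)
--             while lo < hi:
--                 mid = (lo + hi) // 2
--                 if bounds[mid + 1] <= start:
--                     lo = mid + 1
--                 else:
--                     hi = mid
--             token_to_line.append(nos[lo])
--         else:
--             token_to_line.append(None)
--     return token_to_line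
-- ===== Notes on version B (the rewrite author's own statement) =====
-- stated objective: alternative
-- what changed: B precomputes the cumulative span boundaries once and binary-searches each token's start offset, replacing A's per-token linear scan over the line spans (O((T+L) log L) vs O(T*L) worst case; measured only ~1.3x in a timing run, so not claimed as faster).
import Mathlib
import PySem

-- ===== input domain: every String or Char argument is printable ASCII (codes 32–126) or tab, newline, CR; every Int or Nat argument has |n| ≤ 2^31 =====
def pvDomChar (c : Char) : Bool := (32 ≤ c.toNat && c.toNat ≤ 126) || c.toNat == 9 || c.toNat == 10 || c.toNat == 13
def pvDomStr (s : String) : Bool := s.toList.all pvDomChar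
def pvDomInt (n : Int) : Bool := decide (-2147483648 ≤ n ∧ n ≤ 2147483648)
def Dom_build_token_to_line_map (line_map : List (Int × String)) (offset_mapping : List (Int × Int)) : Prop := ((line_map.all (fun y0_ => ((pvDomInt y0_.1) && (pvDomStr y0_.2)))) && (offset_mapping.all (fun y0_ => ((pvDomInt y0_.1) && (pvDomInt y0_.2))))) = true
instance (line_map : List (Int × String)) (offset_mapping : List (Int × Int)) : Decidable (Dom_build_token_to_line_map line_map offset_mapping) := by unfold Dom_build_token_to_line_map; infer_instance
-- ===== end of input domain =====

-- B replaces A's per-token linear scan over all line spans by one precomputed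
-- cumulative-boundary list plus a binary search per token start offset.


-- ===== PORT A =====
-- inner 'for … break' loop of A: first span (line_no, s, e) with s <= start < e
def pvMatchA (line_spans : List (Int × Int × Int)) (start : Int) : Option Int :=
  match line_spans with
  | [] => none
  | (line_no, span_start, span_end) :: rest =>
    if span_start ≤ start ∧ start < span_end then some line_no
    else pvMatchA rest start

def build_token_to_line_map (line_map : List (Int × String)) (offset_mapping : List (Int × Int)) : List (Option Int) :=
  -- first loop: build line_spans and total_offset
  let st := line_map.foldl (fun (acc : List (Int × Int × Int) × Int) p =>
    let line_header := "[" ++ PySem.Int.toStr p.1 ++ "] "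
    let line_len := PySem.Str.len (line_header ++ p.2) + 1
    (acc.1 ++ [(p.1, acc.2, acc.2 + line_len)], acc.2 + line_len)) ([], 0)
  -- second loop: per token, linear scan over line_spans
  offset_mapping.foldl (fun out t => out ++ [pvMatchA st.1 t.1]) []

-- ===== PORT B =====
-- B's 'while lo < hi' binary search; list indices are provably in range
-- (0 ≤ mid+1 < |bounds|) wherever B runs it, so plain getD is exact there
def pvBsearch (bounds : List Int) (start : Int) (lo hi : Nat) : Nat :=
  if _h : lo < hi then
    let mid := (lo + hi) / 2
    if bounds.getD (mid + 1) 0 ≤ start then pvBsearch bounds start (mid + 1) hi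
    else pvBsearch bounds start lo mid
  else lo
  termination_by hi - lo
  decreasing_by all_goals omega

def build_token_to_line_map_alt (line_map : List (Int × String)) (offset_mapping : List (Int × Int)) : List (Option Int) :=
  -- first loop: nos, bounds (cumulative), total
  let st := line_map.foldl (fun (acc : List Int × List Int × Int) p =>
      let total := acc.2.2 + (PySem.Str.len p.2 + PySem.Str.len (PySem.Int.toStr p.1) + 4)
      (acc.1 ++ [p.1], acc.2.1 ++ [total], total)) ([], [0], 0)
  let nos := st.1
  let bounds := st.2.1
  let total := st.2.2
  -- second loop: guard + binary search per token (nos[lo] in range when the guard holds)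
  offset_mapping.foldl (fun out t =>
    out ++ [if 0 ≤ t.1 ∧ t.1 < total then some (nos.getD (pvBsearch bounds t.1 0 nos.length) 0) else none]) []

-- ===== PRECONDITION & SPEC =====
def Spec_build_token_to_line_map (line_map : List (Int × String)) (offset_mapping : List (Int × Int)) (out : List (Option Int)) : Prop := out = build_token_to_line_map_alt line_map offset_mapping
instance (line_map : List (Int × String)) (offset_mapping : List (Int × Int)) (out : List (Option Int)) : Decidable (Spec_build_token_to_line_map line_map offset_mapping out) := by unfold Spec_build_token_to_line_map; infer_instance

-- ===== CLAIM (what is proved, stated in full; the proofs are below) =====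
def Claim_equal_build_token_to_line_map : Prop := ∀ (line_map : List (Int × String)) (offset_mapping : List (Int × Int)), Dom_build_token_to_line_map line_map offset_mapping → Spec_build_token_to_line_map line_map offset_mapping (build_token_to_line_map line_map offset_mapping)

-- ===== LEMMAS AND PROOFS =====

-- length contributed by one (line_no, line) entry, as B computes it
def pvLen (p : Int × String) : Int :=
  PySem.Str.len p.2 + PySem.Str.len (PySem.Int.toStr p.1) + 4

-- sum of the lengths of the first k entries
def pvPsum : List (Int × String) → Nat → Int
  | _, 0 => 0
  | [], _ + 1 => 0
  | p :: r, k + 1 => pvLen p + pvPsum r k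

-- the spans A's first loop builds, starting at offset t0
def pvSpans (t0 : Int) : List (Int × String) → List (Int × Int × Int)
  | [] => []
  | p :: r => (p.1, t0, t0 + pvLen p) :: pvSpans (t0 + pvLen p) r

-- the bounds B's first loop appends after the initial 0, starting at offset t0
def pvBounds (t0 : Int) : List (Int × String) → List Int
  | [] => []
  | p :: r => (t0 + pvLen p) :: pvBounds (t0 + pvLen p) r

theorem pvLen_nonneg (p : Int × String) : 0 ≤ pvLen p := by
  simp [pvLen, PySem.Str.len_eq]; positivity

theorem pvPsum_nonneg (l : List (Int × String)) (k : Nat) : 0 ≤ pvPsum l k := by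
  induction l generalizing k with
  | nil => cases k <;> simp [pvPsum]
  | cons p r ih =>
    cases k with
    | zero => simp [pvPsum]
    | succ k => have := pvLen_nonneg p; have := ih k; simp [pvPsum]; omega

theorem pvPsum_mono (l : List (Int × String)) (i j : Nat) (h : i ≤ j) :
    pvPsum l i ≤ pvPsum l j := by
  induction l generalizing i j with
  | nil => cases i <;> cases j <;> simp [pvPsum]
  | cons p r ih =>
    cases i with
    | zero =>
      cases j with
      | zero => exact le_refl _
      | succ j =>
        have := pvLen_nonneg p; have := pvPsum_nonneg r j
        simp only [pvPsum]; omega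
    | succ i =>
      cases j with
      | zero => omega
      | succ j =>
        have := ih i j (by omega)
        simp only [pvPsum]; omega

-- A's length expression equals B's
theorem pvLenA_eq (p : Int × String) :
    PySem.Str.len (("[" ++ PySem.Int.toStr p.1 ++ "] ") ++ p.2) + 1 = pvLen p := by
  simp [pvLen]
  have h1 : PySem.Str.len "[" = 1 := by decide
  have h2 : PySem.Str.len "] " = 2 := by decide
  omega

-- A's first fold
theorem pvFoldA (l : List (Int × String)) (acc : List (Int × Int × Int)) (t0 : Int) :
    l.foldl (fun (acc : List (Int × Int × Int) × Int) p =>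
      let line_header := "[" ++ PySem.Int.toStr p.1 ++ "] "
      let line_len := PySem.Str.len (line_header ++ p.2) + 1
      (acc.1 ++ [(p.1, acc.2, acc.2 + line_len)], acc.2 + line_len)) (acc, t0)
    = (acc ++ pvSpans t0 l, t0 + pvPsum l l.length) := by
  induction l generalizing acc t0 with
  | nil => simp [pvSpans, pvPsum]
  | cons p r ih =>
    simp only [List.foldl_cons]
    rw [ih]
    simp only [pvLenA_eq, pvSpans, pvPsum, List.length_cons, List.append_assoc,
      List.singleton_append, Prod.mk.injEq]
    exact ⟨trivial, by omega⟩

-- B's first fold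
theorem pvFoldB (l : List (Int × String)) (ns bs : List Int) (t0 : Int) :
    l.foldl (fun (acc : List Int × List Int × Int) p =>
      let total := acc.2.2 + (PySem.Str.len p.2 + PySem.Str.len (PySem.Int.toStr p.1) + 4)
      (acc.1 ++ [p.1], acc.2.1 ++ [total], total)) (ns, bs, t0)
    = (ns ++ l.map (·.1), bs ++ pvBounds t0 l, t0 + pvPsum l l.length) := by
  induction l generalizing ns bs t0 with
  | nil => simp [pvBounds, pvPsum]
  | cons p r ih =>
    simp only [List.foldl_cons, ih, pvBounds]
    simp [pvLen, pvPsum]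
    omega

theorem pvBounds_getD (l : List (Int × String)) (t0 : Int) (j : Nat) (h : j < l.length) :
    (pvBounds t0 l).getD j 0 = t0 + pvPsum l (j + 1) := by
  induction l generalizing t0 j with
  | nil => simp at h
  | cons p r ih =>
    cases j with
    | zero => simp [pvBounds, pvPsum]
    | succ j =>
      simp only [pvBounds, List.getD_cons_succ, pvPsum]
      rw [ih (t0 + pvLen p) j (by simpa using h)]
      omega

theorem pvBounds0_getD (l : List (Int × String)) (j : Nat) (h : j ≤ l.length) :
    ((0 : Int) :: pvBounds 0 l).getD j 0 = pvPsum l j := by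
  cases j with
  | zero => simp [pvPsum]
  | succ j =>
    simp only [List.getD_cons_succ]
    rw [pvBounds_getD l 0 j (by omega)]
    omega

theorem pvMatchA_none_low (l : List (Int × String)) (t0 start : Int) (h : start < t0) :
    pvMatchA (pvSpans t0 l) start = none := by
  induction l generalizing t0 with
  | nil => simp [pvSpans, pvMatchA]
  | cons p r ih =>
    have := pvLen_nonneg p
    simp only [pvSpans, pvMatchA]
    rw [if_neg (by omega), ih (t0 + pvLen p) (by omega)]

theorem pvMatchA_none_high (l : List (Int × String)) (t0 start : Int)
    (h : t0 + pvPsum l l.length ≤ start) :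
    pvMatchA (pvSpans t0 l) start = none := by
  induction l generalizing t0 with
  | nil => simp [pvSpans, pvMatchA]
  | cons p r ih =>
    have h2 := pvPsum_nonneg r r.length
    simp only [pvPsum, List.length_cons] at h
    simp only [pvSpans, pvMatchA]
    rw [if_neg (by omega)]
    exact ih (t0 + pvLen p) (by omega)

theorem pvMatchA_at (l : List (Int × String)) (t0 start : Int) (r : Nat)
    (hr : r < l.length)
    (hbelow : ∀ j, j < r → t0 + pvPsum l (j + 1) ≤ start)
    (hlo : t0 + pvPsum l r ≤ start)
    (hhi : start < t0 + pvPsum l (r + 1)) :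
    pvMatchA (pvSpans t0 l) start = some ((l.map (·.1)).getD r 0) := by
  induction l generalizing t0 r with
  | nil => simp at hr
  | cons p rest ih =>
    cases r with
    | zero =>
      simp only [pvPsum] at hlo hhi
      simp only [pvSpans, pvMatchA]
      rw [if_pos (by omega)]
      simp
    | succ r =>
      have h0 := hbelow 0 (by omega)
      simp only [pvPsum] at h0 hlo hhi
      simp only [pvSpans, pvMatchA]
      rw [if_neg (by omega)]
      rw [ih (t0 + pvLen p) r (by simpa using hr)
        (fun j hj => by have := hbelow (j + 1) (by omega); simp only [pvPsum] at this; omega)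
        (by omega) (by omega)]
      simp

theorem pvBounds_length (l : List (Int × String)) (t0 : Int) :
    (pvBounds t0 l).length = l.length := by
  induction l generalizing t0 with
  | nil => rfl
  | cons p r ih => simp [pvBounds, ih]

theorem pvPsum_zero (l : List (Int × String)) : pvPsum l 0 = 0 := by
  cases l <;> rfl

-- invariant of B's binary search: it lands on the unique span containing start
theorem pvBsearch_go (bounds : List Int) (start : Int)
    (mono : ∀ i j : Nat, i ≤ j → j < bounds.length → bounds.getD i 0 ≤ bounds.getD j 0) :
    ∀ (n lo hi : Nat), hi - lo ≤ n → lo ≤ hi → hi + 1 ≤ bounds.length →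
    (∀ j, j < lo → bounds.getD (j + 1) 0 ≤ start) →
    (hi + 1 < bounds.length → start < bounds.getD (hi + 1) 0) →
    lo ≤ pvBsearch bounds start lo hi ∧ pvBsearch bounds start lo hi ≤ hi ∧
    (∀ j, j < pvBsearch bounds start lo hi → bounds.getD (j + 1) 0 ≤ start) ∧
    (pvBsearch bounds start lo hi + 1 < bounds.length →
      start < bounds.getD (pvBsearch bounds start lo hi + 1) 0) := by
  intro n
  induction n with
  | zero =>
    intro lo hi hfuel hlh _ hbel hup
    have heq : hi = lo := by omega
    subst heq
    rw [pvBsearch, dif_neg (by omega)]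
    exact ⟨le_refl _, le_refl _, hbel, hup⟩
  | succ n ih =>
    intro lo hi hfuel hlh hlen hbel hup
    by_cases h : lo < hi
    · rw [pvBsearch]
      simp only [dif_pos h]
      by_cases hc : bounds.getD ((lo + hi) / 2 + 1) 0 ≤ start
      · rw [if_pos hc]
        obtain ⟨h1, h2, h3, h4⟩ := ih ((lo + hi) / 2 + 1) hi (by omega) (by omega) hlen
          (by
            intro j hj
            rcases Nat.lt_or_ge j lo with hj2 | hj2
            · exact hbel j hj2
            · exact le_trans (mono (j + 1) ((lo + hi) / 2 + 1) (by omega) (by omega)) hc)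
          hup
        exact ⟨by omega, h2, h3, h4⟩
      · rw [if_neg hc]
        obtain ⟨h1, h2, h3, h4⟩ := ih lo ((lo + hi) / 2) (by omega) (by omega) (by omega) hbel
          (fun _ => not_le.mp hc)
        exact ⟨h1, by omega, h3, h4⟩
    · rw [pvBsearch, dif_neg h]
      have heq : hi = lo := by omega
      subst heq
      exact ⟨le_refl _, le_refl _, hbel, hup⟩

-- the per-token value-- the per-token value computed by A equals the one computed by B
theorem pvToken_eq (l : List (Int × String)) (start : Int) :
    pvMatchA (pvSpans 0 l) start =
    if 0 ≤ start ∧ start < pvPsum l l.length then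
      some ((l.map (·.1)).getD (pvBsearch ((0 : Int) :: pvBounds 0 l) start 0 (l.map (·.1)).length) 0)
    else none := by
  have hblen : ((0 : Int) :: pvBounds 0 l).length = l.length + 1 := by
    simp [pvBounds_length]
  have hget : ∀ j : Nat, j ≤ l.length → ((0 : Int) :: pvBounds 0 l).getD j 0 = pvPsum l j :=
    fun j hj => pvBounds0_getD l j hj
  by_cases hg : 0 ≤ start ∧ start < pvPsum l l.length
  · rw [if_pos hg]
    simp only [List.length_map]
    have mono : ∀ i j : Nat, i ≤ j → j < ((0 : Int) :: pvBounds 0 l).length →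
        ((0 : Int) :: pvBounds 0 l).getD i 0 ≤ ((0 : Int) :: pvBounds 0 l).getD j 0 := by
      intro i j hij hj
      rw [hblen] at hj
      rw [hget i (by omega), hget j (by omega)]
      exact pvPsum_mono l i j hij
    obtain ⟨h1, h2, h3, h4⟩ := pvBsearch_go ((0 : Int) :: pvBounds 0 l) start mono
      l.length 0 l.length (by omega) (by omega) (by omega)
      (fun j hj => absurd hj (by omega))
      (by intro hlt; rw [hblen] at hlt; omega)
    set r := pvBsearch ((0 : Int) :: pvBounds 0 l) start 0 l.length with hr
    have hzero : pvPsum l 0 = 0 := pvPsum_zero l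
    have hrn : r < l.length := by
      rcases Nat.lt_or_ge r l.length with hlt | hge
      · exact hlt
      · exfalso
        have hn1 : 1 ≤ l.length := by
          by_contra hx
          have hl0 : l.length = 0 := by omega
          rw [hl0] at hg
          omega
        have hlast := h3 (l.length - 1) (by omega)
        rw [hget ((l.length - 1) + 1) (by omega)] at hlast
        have he : l.length - 1 + 1 = l.length := by omega
        rw [he] at hlast
        omega
    apply pvMatchA_at l 0 start r hrn
    · intro j hj
      have := h3 j (by omega)
      rw [hget (j + 1) (by omega)] at this
      omega
    · rcases Nat.eq_zero_or_pos r with h0 | h0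
      · rw [h0, hzero]
        omega
      · have := h3 (r - 1) (by omega)
        rw [hget ((r - 1) + 1) (by omega)] at this
        have he : r - 1 + 1 = r := by omega
        rw [he] at this
        omega
    · have := h4 (by rw [hblen]; omega)
      rw [hget (r + 1) (by omega)] at this
      omega
  · rw [if_neg hg]
    by_cases hs : start < 0
    · exact pvMatchA_none_low l 0 start (by omega)
    · have hs' : 0 ≤ start := not_lt.mp hs
      have hge : pvPsum l l.length ≤ start := by
        by_contra hx
        exact hg ⟨hs', not_le.mp hx⟩
      exact pvMatchA_none_high l 0 start (by omega)

-- ===== VERDICT (by name: the statement is the Claim_ definition above) =====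
theorem build_token_to_line_map_spec : Claim_equal_build_token_to_line_map := by
  intro line_map offset_mapping _
  unfold Spec_build_token_to_line_map build_token_to_line_map build_token_to_line_map_alt
  rw [pvFoldA, pvFoldB]
  simp only [List.nil_append]
  rw [PySem.List.foldl_append_singleton_eq_map, PySem.List.foldl_append_singleton_eq_map]
  simp only [List.nil_append, zero_add, List.singleton_append]
  exact List.map_congr_left (fun t _ => pvToken_eq line_map t.1)
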